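-- pv_equiv track=rewrite | github.com/dakotablair/advent-2023 | day9/__init__.py | lextrapolate
-- ===== SOURCE A (Python) =====
-- def lextrapolate(hists):
--     """Use successive differences to extrapolate a new value in reverse."""
--     hists_rev = hists[::-1]
--     out = []
--     for index, hist in enumerate(hists_rev):
--         if index == 0:
--             out.append([0, *hist])
--             continue
--         out.append([(hist[0] - out[index - 1][0]), *hist])
--     return out[-1][0]
-- ===== SOURCE B (Python) =====
-- def lextrapolate(hists):
--     """Alternating sum of the first elements of all rows but the last:
--     single pass, scalar accumulator, no row copying."""
--     acc = 0
--     sign = 1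
--     for hist in hists[:-1]:
--         acc += sign * hist[0]
--         sign = -sign
--     return acc
-- ===== Notes on version B (the rewrite author's own statement) =====
-- stated objective: simpler
-- what changed: Replaces the reversed-list-of-copied-rows construction with a single pass over hists[:-1] keeping only a scalar accumulator and a sign (the alternating sum of the rows' first elements), so no row is copied and no intermediate list is built.
import Mathlib
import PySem

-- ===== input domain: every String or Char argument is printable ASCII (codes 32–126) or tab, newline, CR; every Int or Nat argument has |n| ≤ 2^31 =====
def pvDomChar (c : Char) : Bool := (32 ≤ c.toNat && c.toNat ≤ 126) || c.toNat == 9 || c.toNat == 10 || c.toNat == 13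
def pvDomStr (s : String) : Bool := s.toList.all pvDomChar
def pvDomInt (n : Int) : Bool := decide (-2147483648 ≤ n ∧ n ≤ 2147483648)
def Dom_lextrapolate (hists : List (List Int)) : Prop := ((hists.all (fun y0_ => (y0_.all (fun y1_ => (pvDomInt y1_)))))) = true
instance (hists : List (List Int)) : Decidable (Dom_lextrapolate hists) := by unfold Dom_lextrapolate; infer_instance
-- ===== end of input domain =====

-- B replaces A's reversed list of copied rows by one pass over hists[:-1] with a scalar
-- alternating-sum accumulator and a sign flip (objective: simpler; no row copies, no out list).

-- ===== PORT A =====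
-- the for-loop over enumerate(hists[::-1]) with the growing 'out' list;
-- hist[0] and out[index-1][0] are ported with pyGet? (getD 0 / getD [] is never
-- reached under Pre_, which excludes exactly the inputs where Python raises)
def lextrapolateLoop : List (List Int) → Int → List (List Int) → List (List Int)
  | [], _, out => out
  | hist :: rest, index, out =>
    if index = 0 then
      lextrapolateLoop rest (index + 1) (out ++ [0 :: hist])
    else
      lextrapolateLoop rest (index + 1)
        (out ++ [(((PySem.List.pyGet? hist 0).getD 0) -
                  ((PySem.List.pyGet? ((PySem.List.pyGet? out (index - 1)).getD []) 0).getD 0)) :: hist])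

def lextrapolate (hists : List (List Int)) : Int :=
  -- hists[::-1] is exactly List.reverse
  let hists_rev := hists.reverse
  let out := lextrapolateLoop hists_rev 0 []
  (PySem.List.pyGet? ((PySem.List.pyGet? out (-1)).getD []) 0).getD 0

-- ===== PORT B =====
def lextrapolate_alt (hists : List (List Int)) : Int :=
  ((PySem.List.slice hists none (some (-1))).foldl
      (fun (p : Int × Int) hist => (p.1 + p.2 * ((PySem.List.pyGet? hist 0).getD 0), -p.2))
      ((0 : Int), (1 : Int))).1

-- ===== PRECONDITION & SPEC =====
-- Pre_ excludes exactly where Python A raises: empty hists (out[-1] → IndexError) and an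
-- empty row anywhere but in the last position (hist[0] → IndexError for reversed index ≥ 1).
def Pre_lextrapolate (hists : List (List Int)) : Prop :=
  hists ≠ [] ∧ ∀ h ∈ hists.dropLast, h ≠ []
instance (hists : List (List Int)) : Decidable (Pre_lextrapolate hists) := by
  unfold Pre_lextrapolate; infer_instance
def pvWitness_lextrapolate : List (List Int) := [[3, 1], [2], [5, 7]]

def Spec_lextrapolate (hists : List (List Int)) (out : Int) : Prop := out = lextrapolate_alt hists
instance (hists : List (List Int)) (out : Int) : Decidable (Spec_lextrapolate hists out) := by
  unfold Spec_lextrapolate; infer_instance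

-- ===== CLAIM (what is proved, stated in full; the proofs are below) =====
def Claim_equal_lextrapolate : Prop := ∀ (hists : List (List Int)), Dom_lextrapolate hists → Pre_lextrapolate hists → Spec_lextrapolate hists (lextrapolate hists)

-- ===== LEMMAS AND PROOFS =====

-- first element of a row as both ports compute it
def pvHd (h : List Int) : Int := (PySem.List.pyGet? h 0).getD 0

theorem pvHd_eq_headD (xs : List Int) : (PySem.List.pyGet? xs 0).getD 0 = xs.headD 0 := by
  rw [PySem.List.pyGet?_zero]; cases xs <;> simp

-- the alternating sum both loops amount to: pvG a [h1,...,hk] = h1[0] - (h2[0] - (... - a))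
def pvG (a : Int) : List (List Int) → Int
  | [] => a
  | h :: t => pvHd h - pvG a t

theorem pvLoop_last (rest : List (List Int)) :
    ∀ out : List (List Int), out ≠ [] →
    ((lextrapolateLoop rest (out.length : Int) out).getLast?.getD []).headD 0
      = rest.foldl (fun acc hist => pvHd hist - acc) ((out.getLast?.getD []).headD 0) := by
  induction rest with
  | nil => intro out h; simp [lextrapolateLoop]
  | cons hist rest ih =>
    intro out hout
    obtain ⟨n, hn⟩ : ∃ n, out.length = n + 1 := by
      cases out with
      | nil => exact absurd rfl hout
      | cons a l => exact ⟨l.length, rfl⟩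
    have hidx : ¬ ((out.length : Int) = 0) := by omega
    have hget : PySem.List.pyGet? out ((out.length : Int) - 1) = some (out.getLast hout) := by
      have h1 : ((out.length : Int) - 1) = ((n : Int)) := by omega
      rw [h1, PySem.List.pyGet?_natCast, List.getElem?_eq_getElem (by omega),
          List.getLast_eq_getElem]
      simp [hn]
    have hlast : (out.getLast?.getD []) = out.getLast hout := by
      rw [List.getLast?_eq_some_getLast hout]; rfl
    simp only [lextrapolateLoop, hidx, if_false]
    set v : Int := ((PySem.List.pyGet? hist 0).getD 0) -
        ((PySem.List.pyGet? ((PySem.List.pyGet? out ((out.length : Int) - 1)).getD []) 0).getD 0) with hv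
    have hcast : (out.length : Int) + 1 = (((out ++ [v :: hist]).length : Int)) := by simp
    rw [hcast, ih (out ++ [v :: hist]) (by simp), List.foldl_cons]
    congr 1
    have h1 : ((out ++ [v :: hist]).getLast?.getD []).headD 0 = v := by simp
    rw [h1, hv, hget]
    simp only [Option.getD_some]
    show pvHd hist - pvHd (out.getLast hout) = pvHd hist - (out.getLast?.getD []).headD 0
    rw [hlast]
    simp [pvHd, pvHd_eq_headD]

theorem pvFoldRev_eq_G (l : List (List Int)) (a : Int) :
    l.reverse.foldl (fun acc hist => pvHd hist - acc) a = pvG a l := by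
  induction l with
  | nil => simp [pvG]
  | cons h t ih => simp [pvG, List.foldl_append, ih]

theorem pvBfold_eq_G (l : List (List Int)) :
    ∀ s σ : Int,
    (l.foldl (fun (p : Int × Int) hist => (p.1 + p.2 * ((PySem.List.pyGet? hist 0).getD 0), -p.2)) (s, σ)).1
      = s + σ * pvG 0 l := by
  induction l with
  | nil => intro s σ; simp [pvG]
  | cons h t ih =>
    intro s σ
    simp only [List.foldl_cons, pvG, ih]
    show s + σ * pvHd h + -σ * pvG 0 t = s + σ * (pvHd h - pvG 0 t)
    ring

-- ===== VERDICT (by name: the statement is the Claim_ definition above) =====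
theorem lextrapolate_spec : Claim_equal_lextrapolate := by
  intro hists _ hpre
  obtain ⟨hne, -⟩ := hpre
  unfold Spec_lextrapolate lextrapolate lextrapolate_alt
  rw [PySem.List.slice_to_neg_one, pvBfold_eq_G]
  obtain ⟨h0, rest, hrev⟩ : ∃ h0 rest, hists.reverse = h0 :: rest := by
    cases hr : hists.reverse with
    | nil => exact absurd (by simpa using hr) hne
    | cons a l => exact ⟨a, l, rfl⟩
  have htail : rest = hists.dropLast.reverse := by
    have h1 : hists.reverse.tail = hists.dropLast.reverse := by
      cases hists using List.reverseRecOn with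
      | nil => simp
      | append_singleton l x => simp
    rw [← h1, hrev]
    rfl
  have hloop : lextrapolateLoop hists.reverse 0 [] =
      lextrapolateLoop rest ((([0 :: h0] : List (List Int)).length : Int)) [0 :: h0] := by
    rw [hrev]; simp [lextrapolateLoop]
  simp only [hloop]
  rw [PySem.List.pyGet?_neg_one, pvHd_eq_headD,
      pvLoop_last rest [0 :: h0] (by simp)]
  have hbase : (([0 :: h0] : List (List Int)).getLast?.getD []).headD 0 = 0 := by simp
  rw [hbase, htail, pvFoldRev_eq_G]
  ring
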